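-- pv_equiv track=rewrite | github.com/CarlosDLMC/MBID_CF_Herramientas_de_Programacion | ejercicios_a_entregar/practica_1.py | notas_al_pie
-- ===== SOURCE A (Python) =====
-- def notas_al_pie(original):
--     result = ""
--     count = 1
--     for letter in original:
--         if letter == "*":
--             result += f"({count})"
--             count += 1
--         else:
--             result += letter
--     return result
-- ===== SOURCE B (Python) =====
-- def notas_al_pie(original):
--     parts = original.split('*')
--     result = parts[0]
--     for i, part in enumerate(parts[1:], 1):
--         result += f"({i})" + part
--     return result
-- ===== Notes on version B (the rewrite author's own statement) =====
-- stated objective: idiomatic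
-- what changed: B splits the text on '*' once and stitches the segments back with '(i)' markers whose number is the segment index, instead of A's character-by-character scan with an explicit counter.
import Mathlib
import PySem

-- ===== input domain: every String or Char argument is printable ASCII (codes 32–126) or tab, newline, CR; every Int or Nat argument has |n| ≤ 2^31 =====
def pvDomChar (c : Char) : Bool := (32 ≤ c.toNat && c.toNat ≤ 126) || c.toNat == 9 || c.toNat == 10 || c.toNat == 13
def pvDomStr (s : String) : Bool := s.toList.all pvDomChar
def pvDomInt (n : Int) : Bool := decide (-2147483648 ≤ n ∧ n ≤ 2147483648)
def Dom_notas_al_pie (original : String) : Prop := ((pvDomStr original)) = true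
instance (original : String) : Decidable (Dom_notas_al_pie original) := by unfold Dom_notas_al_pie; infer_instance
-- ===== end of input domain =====

-- B replaces A's character-by-character scan (explicit counter) with split-on-'*' and
-- reassembly where the footnote number is the segment index (idiomatic decomposition).


-- ===== PORT A =====
-- state (result, count); f"({count})" is '(' :: toChars count ++ [')']
def notas_al_pie (original : String) : String :=
  let st := original.toList.foldl
    (fun (st : List Char × Int) letter =>
      if letter = '*' then (st.1 ++ ('(' :: PySem.Int.toChars st.2 ++ [')']), st.2 + 1)
      else (st.1 ++ [letter], st.2)) ([], 1)
  String.ofList st.1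

-- ===== PORT B =====
-- parts = original.split('*'); result = parts[0]; for i, part in enumerate(parts[1:], 1): result += f"({i})" + part
def notas_al_pie_alt (original : String) : String :=
  let parts := PySem.Chars.splitOn original.toList ['*']
  match parts with
  | [] => String.ofList []        -- unreachable: split never returns []
  | p :: ps =>
      String.ofList ((PySem.List.enumerate ps 1).foldl
        (fun acc ip => acc ++ ('(' :: PySem.Int.toChars ip.1 ++ [')']) ++ ip.2) p)

-- ===== PRECONDITION & SPEC =====
def Spec_notas_al_pie (original : String) (out : String) : Prop := out = notas_al_pie_alt original
instance (original : String) (out : String) : Decidable (Spec_notas_al_pie original out) := by unfold Spec_notas_al_pie; infer_instance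

-- ===== CLAIM (what is proved, stated in full; the proofs are below) =====
def Claim_equal_notas_al_pie : Prop := ∀ (original : String), Dom_notas_al_pie original → Spec_notas_al_pie original (notas_al_pie original)

-- ===== LEMMAS AND PROOFS =====

-- structural single-character split on '*'
def splitStar : List Char → List (List Char)
  | [] => [[]]
  | c :: cs =>
    if c = '*' then [] :: splitStar cs
    else match splitStar cs with
      | [] => [[c]]
      | p :: ps => (c :: p) :: ps

def consFirst (x : List Char) : List (List Char) → List (List Char)
  | [] => [x]
  | p :: ps => (x ++ p) :: ps

-- the markers-and-segments rendering of the tail segments, numbered from n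
def tailRender : Int → List (List Char) → List Char
  | _, [] => []
  | n, p :: ps => ('(' :: PySem.Int.toChars n ++ [')']) ++ p ++ tailRender (n + 1) ps

-- recursive form of A's scan
def specA : List Char → Int → List Char
  | [], _ => []
  | c :: cs, n =>
    if c = '*' then ('(' :: PySem.Int.toChars n ++ [')']) ++ specA cs (n + 1)
    else c :: specA cs n

theorem splitStar_ne_nil (cs : List Char) : splitStar cs ≠ [] := by
  cases cs with
  | nil => simp [splitStar]
  | cons c cs =>
    simp only [splitStar]
    split
    · simp
    · split <;> simp

theorem consFirst_nil (ps : List (List Char)) (h : ps ≠ []) : consFirst [] ps = ps := by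
  cases ps with
  | nil => exact absurd rfl h
  | cons p ps => simp [consFirst]

theorem go_eq (fuel : Nat) (l : List Char) (h : l.length ≤ fuel)
    (cur : List Char) (acc : List (List Char)) :
    PySem.Chars.splitOn.go ['*'] fuel l cur acc
      = acc.reverse ++ consFirst cur.reverse (splitStar l) := by
  induction fuel generalizing l cur acc with
  | zero =>
    have hl : l = [] := List.eq_nil_of_length_eq_zero (Nat.le_zero.mp h)
    subst hl
    simp [PySem.Chars.splitOn.go, splitStar, consFirst]
  | succ fuel ih =>
    cases l with
    | nil => simp [PySem.Chars.splitOn.go, splitStar, consFirst]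
    | cons c rest =>
      rw [PySem.Chars.splitOn.go]
      by_cases hc : c = '*'
      · subst hc
        have hpre : List.isPrefixOf ['*'] ('*' :: rest) = true := by
          simp [List.isPrefixOf]
        simp only [hpre, if_pos]
        have hdrop : List.drop (['*'].length) ('*' :: rest) = rest := rfl
        rw [hdrop, ih rest (by simpa using Nat.le_of_succ_le_succ h)]
        simp only [List.reverse_nil, List.reverse_cons]
        rw [consFirst_nil (splitStar rest) (splitStar_ne_nil rest)]
        simp [splitStar, consFirst]
      · have hpre : List.isPrefixOf ['*'] (c :: rest) = false := by
          simp [List.isPrefixOf]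
          exact fun h' => hc h'.symm
        simp only [hpre, Bool.false_eq_true, if_false]
        rw [ih rest (by simpa using Nat.le_of_succ_le_succ h)]
        simp only [splitStar, hc, List.reverse_cons]
        
        cases hs : splitStar rest with
        | nil => exact absurd hs (splitStar_ne_nil rest)
        | cons p ps => simp [consFirst]

theorem splitOn_eq (l : List Char) :
    PySem.Chars.splitOn l ['*'] = splitStar l := by
  unfold PySem.Chars.splitOn
  rw [go_eq (l.length + 1) l (Nat.le_succ _) [] []]
  simp [consFirst_nil (splitStar l) (splitStar_ne_nil l)]

theorem foldA_fst (cs : List Char) (acc : List Char) (n : Int) :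
    (cs.foldl
      (fun (st : List Char × Int) letter =>
        if letter = '*' then (st.1 ++ ('(' :: PySem.Int.toChars st.2 ++ [')']), st.2 + 1)
        else (st.1 ++ [letter], st.2)) (acc, n)).1 = acc ++ specA cs n := by
  induction cs generalizing acc n with
  | nil => simp [specA]
  | cons c cs ih =>
    by_cases hc : c = '*'
    · subst hc
      simp only [List.foldl_cons]
      rw [ih]
      simp [specA]
    · simp only [List.foldl_cons, if_neg hc]
      rw [ih]
      simp [specA, hc]

theorem foldB (ps : List (List Char)) (n : Int) (acc : List Char) :
    (PySem.List.enumerate ps n).foldl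
      (fun acc ip => acc ++ ('(' :: PySem.Int.toChars ip.1 ++ [')']) ++ ip.2) acc
      = acc ++ tailRender n ps := by
  induction ps generalizing n acc with
  | nil => simp [PySem.List.enumerate_nil, tailRender]
  | cons p ps ih =>
    rw [PySem.List.enumerate_cons]
    simp only [List.foldl_cons]
    rw [ih]
    simp [tailRender]

theorem specA_eq (cs : List Char) (n : Int) (p : List Char) (ps : List (List Char))
    (h : splitStar cs = p :: ps) : specA cs n = p ++ tailRender n ps := by
  induction cs generalizing n p ps with
  | nil =>
    simp only [splitStar] at h
    cases h
    simp [specA, tailRender]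
  | cons c cs ih =>
    by_cases hc : c = '*'
    · subst hc
      simp only [splitStar] at h
      cases h
      cases hs : splitStar cs with
      | nil => exact absurd hs (splitStar_ne_nil cs)
      | cons q qs =>
        simp only [specA]
        rw [ih (n + 1) q qs hs]
        simp [tailRender]
    · simp only [splitStar, if_neg hc] at h
      cases hs : splitStar cs with
      | nil => exact absurd hs (splitStar_ne_nil cs)
      | cons q qs =>
        rw [hs] at h
        injection h with h1 h2
        subst h1; subst h2
        simp only [specA, if_neg hc]
        rw [ih n q qs hs]
        simp

-- ===== VERDICT (by name: the statement is the Claim_ definition above) =====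
theorem notas_al_pie_spec : Claim_equal_notas_al_pie := by
  intro original _
  unfold Spec_notas_al_pie notas_al_pie notas_al_pie_alt
  rw [splitOn_eq]
  cases h : splitStar original.toList with
  | nil => exact absurd h (splitStar_ne_nil _)
  | cons p ps =>
    simp only []
    rw [foldB, foldA_fst, specA_eq original.toList 1 p ps h]
    simp
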